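-- pv_equiv track=rewrite | github.com/ANISIMOV-STUDIO/IOT_App | migrate_imports.py | add_hvac_ui_kit_import
-- ===== SOURCE A (Python) =====
-- def add_hvac_ui_kit_import(content):
--     """Add hvac_ui_kit import after other package imports"""
--     lines = content.split('\n')
--     insert_index = -1
--
--     # Find the last package import
--     for i, line in enumerate(lines):
--         if line.strip().startswith("import 'package:"):
--             insert_index = i + 1
--         elif line.strip().startswith("import '") and insert_index == -1:
--             # First relative import, insert before it
--             insert_index = i
--             break
--
--     if insert_index == -1:
--         # No imports found, insert after library declaration or at top
--         for i, line in enumerate(lines):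
--             if line.strip().startswith('library'):
--                 insert_index = i + 1
--                 # Skip empty lines
--                 while insert_index < len(lines) and not lines[insert_index].strip():
--                     insert_index += 1
--                 break
--
--         if insert_index == -1:
--             insert_index = 0
--
--     lines.insert(insert_index, "import 'package:hvac_ui_kit/hvac_ui_kit.dart';")
--     return '\n'.join(lines)
-- ===== SOURCE B (Python) =====
-- NEW_IMPORT = "import 'package:hvac_ui_kit/hvac_ui_kit.dart';"
--
--
-- def _after_library(lines):
--     """Fallback position when the file has no imports at all."""
--     for i, line in enumerate(lines):
--         if line.strip().startswith('library'):
--             j = i + 1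
--             while j < len(lines) and not lines[j].strip():
--                 j += 1
--             return j
--     return 0
--
--
-- def add_hvac_ui_kit_import(content):
--     """Add hvac_ui_kit import after other package imports"""
--     lines = content.split('\n')
--     imports = [i for i, line in enumerate(lines)
--                if line.strip().startswith("import '")]
--     packages = [i for i, line in enumerate(lines)
--                 if line.strip().startswith("import 'package:")]
--     if not imports:
--         k = _after_library(lines)
--     elif imports[0] in packages:
--         k = packages[-1] + 1
--     else:
--         k = imports[0]
--     return '\n'.join(lines[:k] + [NEW_IMPORT] + lines[k:])
-- ===== Notes on version B (the rewrite author's own statement) =====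
-- stated objective: simpler
-- what changed: Replaced A's single stateful scan with a -1 sentinel and break by two explicit index passes (list of import-line indices, list of package-import indices) followed by a three-way decision on first-import/last-package, keeping the library-fallback scan.
import Mathlib
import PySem

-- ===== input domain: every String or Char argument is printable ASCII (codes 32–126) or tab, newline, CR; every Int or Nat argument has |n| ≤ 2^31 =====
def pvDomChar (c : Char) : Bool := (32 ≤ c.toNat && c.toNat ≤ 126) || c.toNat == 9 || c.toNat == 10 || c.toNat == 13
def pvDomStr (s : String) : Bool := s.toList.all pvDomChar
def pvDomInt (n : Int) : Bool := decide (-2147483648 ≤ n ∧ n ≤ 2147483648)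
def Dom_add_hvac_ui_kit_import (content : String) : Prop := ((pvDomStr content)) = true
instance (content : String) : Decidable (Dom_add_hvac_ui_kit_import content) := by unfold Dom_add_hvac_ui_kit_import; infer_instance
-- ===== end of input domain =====

-- B replaces A's single stateful sentinel scan by two explicit index passes (first-import
-- index, last-package-import index) and a three-way decision; objective: simpler decomposition.

-- ===== PORT A =====
-- the for-loop with `insert_index` sentinel and `break`
def pvLoopA : List String → Nat → Int → Int
  | [], _, idx => idx
  | l :: ls, i, idx =>
    if PySem.Str.startswith (PySem.Str.strip l) "import 'package:" then
      pvLoopA ls (i + 1) ((i : Int) + 1)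
    else if PySem.Str.startswith (PySem.Str.strip l) "import '" && idx == -1 then
      (i : Int)  -- break
    else
      pvLoopA ls (i + 1) idx

-- the `while insert_index < len(lines) and not lines[insert_index].strip()` loop, run over the
-- tail of lines after the library line (indices ≥ i+1 correspond exactly to that tail)
def pvSkipBlankA : List String → Nat → Nat
  | [], j => j
  | x :: xs, j => if PySem.Str.strip x == "" then pvSkipBlankA xs (j + 1) else j

-- the fallback for-loop: find `library`, skip blanks; -1 if no library line
def pvLibScanA : List String → Nat → Int
  | [], _ => -1
  | l :: ls, i =>
    if PySem.Str.startswith (PySem.Str.strip l) "library" then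
      ((pvSkipBlankA ls (i + 1) : Nat) : Int)
    else pvLibScanA ls (i + 1)

def add_hvac_ui_kit_import (content : String) : String :=
  let lines := (PySem.Str.split? content "\n").getD []  -- sep "\n" ≠ "": split? is always some
  let idx0 := pvLoopA lines 0 (-1)
  let idx1 : Int :=
    if idx0 == -1 then
      let z := pvLibScanA lines 0
      if z == -1 then 0 else z
    else idx0
  PySem.Str.join "\n" (PySem.List.insert lines idx1 "import 'package:hvac_ui_kit/hvac_ui_kit.dart';")

-- ===== PORT B =====
-- `[i for i, line in enumerate(lines) if line.strip().startswith(pat)]`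
def pvIdxsB (pat : String) : List String → Nat → List Nat
  | [], _ => []
  | l :: ls, i =>
    if PySem.Str.startswith (PySem.Str.strip l) pat then i :: pvIdxsB pat ls (i + 1)
    else pvIdxsB pat ls (i + 1)

-- B's while loop over the tail after the library line
def pvSkipBlankB : List String → Nat → Nat
  | [], j => j
  | x :: xs, j => if PySem.Str.strip x == "" then pvSkipBlankB xs (j + 1) else j

-- _after_library
def pvAfterLibB : List String → Nat → Nat
  | [], _ => 0
  | l :: ls, i =>
    if PySem.Str.startswith (PySem.Str.strip l) "library" then pvSkipBlankB ls (i + 1)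
    else pvAfterLibB ls (i + 1)

def add_hvac_ui_kit_import_alt (content : String) : String :=
  let lines := (PySem.Str.split? content "\n").getD []  -- sep "\n" ≠ "": split? is always some
  let imports := pvIdxsB "import '" lines 0
  let packages := pvIdxsB "import 'package:" lines 0
  let k : Nat :=
    match imports with
    | [] => pvAfterLibB lines 0
    | j :: _ =>
      -- `packages[-1]`: packages is nonempty in this branch (j ∈ packages), so getD 0 never fires
      if j ∈ packages then (packages.getLast?.getD 0) + 1 else j
  PySem.Str.join "\n" (lines.take k ++ "import 'package:hvac_ui_kit/hvac_ui_kit.dart';" :: lines.drop k)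

-- ===== PRECONDITION & SPEC =====
def Spec_add_hvac_ui_kit_import (content : String) (out : String) : Prop := out = add_hvac_ui_kit_import_alt content
instance (content : String) (out : String) : Decidable (Spec_add_hvac_ui_kit_import content out) := by unfold Spec_add_hvac_ui_kit_import; infer_instance

-- ===== CLAIM (what is proved, stated in full; the proofs are below) =====
def Claim_equal_add_hvac_ui_kit_import : Prop := ∀ (content : String), Dom_add_hvac_ui_kit_import content → Spec_add_hvac_ui_kit_import content (add_hvac_ui_kit_import content)

-- ===== LEMMAS AND PROOFS =====

-- a package import is an import
theorem pv_imp_of_pkg (s : String) (h : PySem.Str.startswith (PySem.Str.strip s) "import 'package:" = true) :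
    PySem.Str.startswith (PySem.Str.strip s) "import '" = true := by
  simp only [PySem.Str.startswith_eq, PySem.Chars.startswith_iff] at h ⊢
  exact List.IsPrefix.trans (by decide) h

-- elements of pvIdxsB lie in [i, i + length)
theorem pv_idxs_bounds (pat : String) (ls : List String) (i j : Nat)
    (h : j ∈ pvIdxsB pat ls i) : i ≤ j ∧ j < i + ls.length := by
  induction ls generalizing i with
  | nil => simp [pvIdxsB] at h
  | cons l ls ih =>
    simp only [pvIdxsB] at h
    split at h
    · rcases List.mem_cons.1 h with rfl | h
      · simp
      · have := ih (i+1) h; constructor <;> [omega; (simp [List.length_cons]; omega)]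
    · have := ih (i+1) h; constructor <;> [omega; (simp [List.length_cons]; omega)]

-- once the sentinel is set, the loop returns last-package-index + 1 (or keeps the sentinel)
theorem pv_loopA_set (ls : List String) (i : Nat) (idx : Int) (h : idx ≠ -1) :
    pvLoopA ls i idx =
      match (pvIdxsB "import 'package:" ls i).getLast? with
      | none => idx
      | some j => (j : Int) + 1 := by
  induction ls generalizing i idx with
  | nil => simp [pvLoopA, pvIdxsB]
  | cons l ls ih =>
    simp only [pvLoopA, pvIdxsB]
    by_cases hp : PySem.Str.startswith (PySem.Str.strip l) "import 'package:" = true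
    · simp only [hp, if_true]
      rw [ih (i+1) ((i:Int)+1) (by omega)]
      cases hg : (pvIdxsB "import 'package:" ls (i+1)).getLast? with
      | none =>
        have : pvIdxsB "import 'package:" ls (i+1) = [] := List.getLast?_eq_none_iff.1 hg
        simp [this]
      | some j =>
        obtain ⟨a, as, he⟩ := List.exists_cons_of_ne_nil (by intro he; rw [he] at hg; simp at hg :
          pvIdxsB "import 'package:" ls (i+1) ≠ [])
        rw [he] at hg ⊢
        rw [List.getLast?_cons_cons, hg]
    · simp only [hp, if_false, Bool.false_eq_true]
      have : (idx == -1) = false := by simp [h]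
      simp only [this, Bool.and_false, if_false, Bool.false_eq_true]
      exact ih (i+1) idx h

-- the main loop from the -1 sentinel, characterised by B's two index lists
theorem pv_loopA_start (ls : List String) (i : Nat) :
    pvLoopA ls i (-1) =
      match pvIdxsB "import '" ls i with
      | [] => -1
      | j :: _ =>
        if j ∈ pvIdxsB "import 'package:" ls i then
          ((pvIdxsB "import 'package:" ls i).getLast?.getD 0 : Int) + 1
        else (j : Int) := by
  induction ls generalizing i with
  | nil => simp [pvLoopA, pvIdxsB]
  | cons l ls ih =>
    by_cases hp : PySem.Str.startswith (PySem.Str.strip l) "import 'package:" = true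
    · have himp := pv_imp_of_pkg l hp
      simp only [pvLoopA, pvIdxsB, hp, himp, if_true]
      rw [pv_loopA_set ls (i+1) ((i:Int)+1) (by omega)]
      simp only [List.mem_cons, true_or, if_true]
      cases hg : (pvIdxsB "import 'package:" ls (i+1)).getLast? with
      | none =>
        have : pvIdxsB "import 'package:" ls (i+1) = [] := List.getLast?_eq_none_iff.1 hg
        simp [this]
      | some j =>
        obtain ⟨a, as, he⟩ := List.exists_cons_of_ne_nil (by intro he; rw [he] at hg; simp at hg :
          pvIdxsB "import 'package:" ls (i+1) ≠ [])
        rw [he] at hg ⊢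
        rw [List.getLast?_cons_cons, hg]
        simp
    · by_cases hi : PySem.Str.startswith (PySem.Str.strip l) "import '" = true
      · simp only [pvLoopA, pvIdxsB, hp, hi, if_false, if_true, Bool.false_eq_true]
        have hnm : i ∉ pvIdxsB "import 'package:" ls (i+1) := by
          intro h; have := pv_idxs_bounds _ ls (i+1) i h; omega
        simp [hnm]
      · simp only [pvLoopA, pvIdxsB, hp, hi, if_false, Bool.false_eq_true, Bool.false_and]
        exact ih (i+1)

theorem pv_skip_eq (ls : List String) (j : Nat) : pvSkipBlankA ls j = pvSkipBlankB ls j := by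
  induction ls generalizing j with
  | nil => rfl
  | cons x xs ih => simp only [pvSkipBlankA, pvSkipBlankB]; split <;> simp [ih]

theorem pv_skip_le (ls : List String) (j : Nat) : pvSkipBlankB ls j ≤ j + ls.length := by
  induction ls generalizing j with
  | nil => simp [pvSkipBlankB]
  | cons x xs ih =>
    simp only [pvSkipBlankB]; split
    · have := ih (j+1); simp [List.length_cons]; omega
    · simp

theorem pv_afterLib_le (ls : List String) (i : Nat) : pvAfterLibB ls i ≤ i + ls.length := by
  induction ls generalizing i with
  | nil => simp [pvAfterLibB]
  | cons l ls ih =>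
    simp only [pvAfterLibB]; split
    · have := pv_skip_le ls (i+1); simp [List.length_cons]; omega
    · have := ih (i+1); simp [List.length_cons]; omega

theorem pv_fallback_eq (ls : List String) (i : Nat) :
    (if pvLibScanA ls i = -1 then (0 : Int) else pvLibScanA ls i) = (pvAfterLibB ls i : Int) := by
  induction ls generalizing i with
  | nil => simp [pvLibScanA, pvAfterLibB]
  | cons l ls ih =>
    simp only [pvLibScanA, pvAfterLibB]
    split
    · rw [pv_skip_eq]; simp
    · exact ih (i+1)


-- the two final line lists coincide
theorem pv_core (lines : List String) :
    PySem.List.insert lines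
      (if (pvLoopA lines 0 (-1) == -1) = true then
         (if (pvLibScanA lines 0 == -1) = true then (0 : Int) else pvLibScanA lines 0)
       else pvLoopA lines 0 (-1)) "import 'package:hvac_ui_kit/hvac_ui_kit.dart';"
    = lines.take (match pvIdxsB "import '" lines 0 with
        | [] => pvAfterLibB lines 0
        | j :: _ => if j ∈ pvIdxsB "import 'package:" lines 0 then
            (pvIdxsB "import 'package:" lines 0).getLast?.getD 0 + 1 else j)
      ++ "import 'package:hvac_ui_kit/hvac_ui_kit.dart';" ::
      lines.drop (match pvIdxsB "import '" lines 0 with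
        | [] => pvAfterLibB lines 0
        | j :: _ => if j ∈ pvIdxsB "import 'package:" lines 0 then
            (pvIdxsB "import 'package:" lines 0).getLast?.getD 0 + 1 else j) := by
  rw [pv_loopA_start lines 0]
  cases himp : pvIdxsB "import '" lines 0 with
  | nil =>
    simp only [beq_iff_eq, if_true]
    rw [pv_fallback_eq lines 0]
    exact PySem.List.insert_natCast lines (pvAfterLibB lines 0) _
      (by have := pv_afterLib_le lines 0; omega)
  | cons j rest =>
    simp only
    by_cases hm : j ∈ pvIdxsB "import 'package:" lines 0
    · simp only [hm, if_true]
      cases hg : (pvIdxsB "import 'package:" lines 0).getLast? with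
      | none =>
        exact absurd (List.getLast?_eq_none_iff.1 hg ▸ hm) (List.not_mem_nil)
      | some m =>
        have hmem : m ∈ pvIdxsB "import 'package:" lines 0 := List.mem_of_getLast? hg
        have hb := pv_idxs_bounds _ lines 0 m hmem
        have h1 : ((m : Int) + 1 == -1) = false := by simp; omega
        simp only [h1, if_false, Bool.false_eq_true, Option.getD_some]
        have : ((m : Int) + 1) = ((m + 1 : Nat) : Int) := by push_cast; ring
        rw [this]
        exact PySem.List.insert_natCast lines (m + 1) _ (by omega)
    · simp only [hm, if_false]
      have hj : j ∈ pvIdxsB "import '" lines 0 := by rw [himp]; exact List.mem_cons_self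
      have hb := pv_idxs_bounds _ lines 0 j hj
      have h1 : ((j : Int) == -1) = false := by simp
      simp only [h1, if_false, Bool.false_eq_true]
      exact PySem.List.insert_natCast lines j _ (by omega)

-- ===== VERDICT (by name: the statement is the Claim_ definition above) =====
theorem add_hvac_ui_kit_import_spec : Claim_equal_add_hvac_ui_kit_import := by
  intro content _
  exact congrArg (PySem.Str.join "
") (pv_core ((PySem.Str.split? content "
").getD []))
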